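-- pv_equiv track=rewrite | github.com/samucarpi/Tirocinio | analyst/analyst.py | countRAFReactions
-- ===== SOURCE A (Python) =====
-- def countRAFReactions(lines):
--     count=0
--     flag=False
--     for line in lines:
--         if line.startswith("10.0"):
--             break
--         if flag:
--             count += 1
--         if len(line.strip()) == 0 and not flag:
--             flag=True
--     return count
-- ===== SOURCE B (Python) =====
-- def countRAFReactions(lines):
--     end = next((i for i, l in enumerate(lines) if l.startswith("10.0")), len(lines))
--     blank = next((i for i, l in enumerate(lines[:end]) if len(l.strip()) == 0), None)
--     return 0 if blank is None else end - blank - 1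
-- ===== Notes on version B (the rewrite author's own statement) =====
-- stated objective: alternative
-- what changed: Replaced the flag-driven counting loop by index arithmetic: find the index of the first '10.0' line (or len), find the first blank line's index in that prefix, and return end - blank - 1 (0 if no blank).
import Mathlib
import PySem

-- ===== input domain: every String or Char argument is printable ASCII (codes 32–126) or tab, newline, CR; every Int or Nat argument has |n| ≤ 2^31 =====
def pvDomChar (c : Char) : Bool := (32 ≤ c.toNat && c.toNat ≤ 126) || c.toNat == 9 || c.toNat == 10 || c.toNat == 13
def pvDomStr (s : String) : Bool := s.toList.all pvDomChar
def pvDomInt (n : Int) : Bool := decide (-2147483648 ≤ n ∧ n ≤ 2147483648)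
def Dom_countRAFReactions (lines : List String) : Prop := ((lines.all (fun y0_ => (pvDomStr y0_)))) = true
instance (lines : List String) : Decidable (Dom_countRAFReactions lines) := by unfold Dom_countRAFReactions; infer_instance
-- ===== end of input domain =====

-- B replaces A's flag-driven counting loop by index arithmetic (index of first '10.0',
-- index of first blank in that prefix, subtraction): alternative algorithm, same O(n) cost.

-- ===== PORT A =====
-- A's loop: state (count, flag), break on a line starting with "10.0"
def pvLoopA : List String → Int → Bool → Int
  | [], count, _ => count
  | line :: rest, count, flag =>
    if PySem.Str.startswith line "10.0" then count
    else
      let count' := if flag then count + 1 else count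
      let flag' := if PySem.Str.len (PySem.Str.strip line) = 0 ∧ flag = false then true else flag
      pvLoopA rest count' flag'

def countRAFReactions (lines : List String) : Int := pvLoopA lines 0 false

-- ===== PORT B =====
-- index of the first line starting with "10.0", or the length of the list
def pvMarkerIdx : List String → Nat
  | [] => 0
  | line :: rest => if PySem.Str.startswith line "10.0" then 0 else pvMarkerIdx rest + 1

-- index of the first blank line, if any
def pvBlankIdx : List String → Option Nat
  | [] => none
  | line :: rest =>
    if PySem.Str.len (PySem.Str.strip line) = 0 then some 0
    else (pvBlankIdx rest).map (· + 1)

def countRAFReactions_alt (lines : List String) : Int :=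
  let e := pvMarkerIdx lines
  match pvBlankIdx (lines.take e) with
  | none => 0
  | some b => (e : Int) - b - 1

-- ===== PRECONDITION & SPEC =====
def Spec_countRAFReactions (lines : List String) (out : Int) : Prop := out = countRAFReactions_alt lines
instance (lines : List String) (out : Int) : Decidable (Spec_countRAFReactions lines out) := by unfold Spec_countRAFReactions; infer_instance

-- ===== CLAIM (what is proved, stated in full; the proofs are below) =====
def Claim_equal_countRAFReactions : Prop := ∀ (lines : List String), Dom_countRAFReactions lines → Spec_countRAFReactions lines (countRAFReactions lines)

-- ===== LEMMAS AND PROOFS =====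
-- once the flag is set, A's loop counts exactly the lines before the marker
theorem pvLoopA_true (l : List String) : ∀ c : Int, pvLoopA l c true = c + (pvMarkerIdx l : Int) := by
  induction l with
  | nil => intro c; simp [pvLoopA, pvMarkerIdx]
  | cons line rest ih =>
    intro c
    simp only [pvLoopA, pvMarkerIdx]
    split_ifs with h1 <;> simp_all <;> push_cast <;> ring

theorem pvLoopA_false (l : List String) :
    pvLoopA l 0 false = countRAFReactions_alt l := by
  induction l with
  | nil => rfl
  | cons line rest ih =>
    by_cases h1 : PySem.Str.startswith line "10.0" = true
    · simp only [pvLoopA, countRAFReactions_alt, pvMarkerIdx, if_pos h1, List.take_zero,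
        pvBlankIdx]
    · by_cases h2 : PySem.Str.len (PySem.Str.strip line) = 0
      · have e1 : pvLoopA (line :: rest) 0 false = pvLoopA rest 0 true := by
          simp only [pvLoopA, if_neg h1]
          rw [if_pos (⟨h2, trivial⟩ : PySem.Str.len (PySem.Str.strip line) = 0 ∧ True)]
          norm_num
        rw [e1, pvLoopA_true rest 0]
        simp only [countRAFReactions_alt, pvMarkerIdx, if_neg h1, List.take_succ_cons,
          pvBlankIdx, if_pos h2]
        push_cast; omega
      · have e1 : pvLoopA (line :: rest) 0 false = pvLoopA rest 0 false := by
          simp only [pvLoopA, if_neg h1]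
          rw [if_neg (fun (h : PySem.Str.len (PySem.Str.strip line) = 0 ∧ True) => h2 h.1)]
          norm_num
        rw [e1, ih]
        simp only [countRAFReactions_alt, pvMarkerIdx, if_neg h1, List.take_succ_cons,
          pvBlankIdx, if_neg h2]
        cases hb : pvBlankIdx (rest.take (pvMarkerIdx rest)) with
        | none => simp [hb]
        | some b => simp only [hb, Option.map_some]; push_cast; ring

-- ===== VERDICT (by name: the statement is the Claim_ definition above) =====
theorem countRAFReactions_spec : Claim_equal_countRAFReactions := by
  intro lines _
  exact pvLoopA_false lines
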